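-- pv_equiv track=rewrite | github.com/wjt/hypothesis | hypothesis/internal/test_interestingexamples.py | long_and_all_same_sign
-- ===== SOURCE A (Python) =====
-- def long_and_all_same_sign(xs):
--     if len(xs) <= 10:
--         return False
--     if all(x > 0 for x in xs):
--         return True
--     if all(x < 0 for x in xs):
--         return True
--     if all(x == 0 for x in xs):
--         return True
--     return False
-- ===== SOURCE B (Python) =====
-- def long_and_all_same_sign(xs):
--     if len(xs) <= 10:
--         return False
--     signs = set()
--     for x in xs:
--         signs.add((x > 0) - (x < 0))
--     return len(signs) == 1
-- ===== Notes on version B (the rewrite author's own statement) =====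
-- stated objective: simpler
-- what changed: Replaces A's three sequential full-list all() scans by a single pass that collects each element's sign (-1/0/+1) into a set and tests whether exactly one sign occurs.
import Mathlib
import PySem

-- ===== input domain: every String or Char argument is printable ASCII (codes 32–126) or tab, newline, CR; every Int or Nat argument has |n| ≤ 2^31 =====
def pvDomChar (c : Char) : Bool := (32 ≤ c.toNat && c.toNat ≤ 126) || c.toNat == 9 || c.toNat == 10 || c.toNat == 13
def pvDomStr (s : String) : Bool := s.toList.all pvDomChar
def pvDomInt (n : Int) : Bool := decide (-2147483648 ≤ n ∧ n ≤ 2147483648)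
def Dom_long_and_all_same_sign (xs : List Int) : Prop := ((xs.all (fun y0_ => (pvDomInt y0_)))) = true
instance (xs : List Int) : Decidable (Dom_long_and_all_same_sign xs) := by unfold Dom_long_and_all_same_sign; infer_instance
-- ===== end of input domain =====

-- B replaces A's three sequential all() scans by one pass collecting each element's sign into a set (objective: simpler).

-- ===== PORT A =====
def long_and_all_same_sign (xs : List Int) : Bool :=
  if xs.length ≤ 10 then false
  else if xs.all (fun x => decide (x > 0)) then true
  else if xs.all (fun x => decide (x < 0)) then true
  else if xs.all (fun x => decide (x = 0)) then true
  else false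

-- ===== PORT B =====
-- (x > 0) - (x < 0) on Python bools
def pySign (x : Int) : Int := (if x > 0 then 1 else 0) - (if x < 0 then 1 else 0)

def long_and_all_same_sign_alt (xs : List Int) : Bool :=
  if xs.length ≤ 10 then false
  else
    let signs := xs.foldl (fun s x => PySem.Set.add s (pySign x)) PySem.Set.empty
    signs.length == 1

-- ===== PRECONDITION & SPEC =====
def Spec_long_and_all_same_sign (xs : List Int) (out : Bool) : Prop := out = long_and_all_same_sign_alt xs
instance (xs : List Int) (out : Bool) : Decidable (Spec_long_and_all_same_sign xs out) := by unfold Spec_long_and_all_same_sign; infer_instance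

-- ===== CLAIM (what is proved, stated in full; the proofs are below) =====
def Claim_equal_long_and_all_same_sign : Prop := ∀ (xs : List Int), Dom_long_and_all_same_sign xs → Spec_long_and_all_same_sign xs (long_and_all_same_sign xs)

-- ===== LEMMAS AND PROOFS =====

-- B's fold is set(map(pySign, xs))
theorem fold_eq_ofList_map (xs : List Int) :
    xs.foldl (fun s x => PySem.Set.add s (pySign x)) PySem.Set.empty
      = PySem.Set.ofList (xs.map pySign) := by
  rw [PySem.Set.ofList_eq_foldl, List.foldl_map]
  rfl

-- a nodup list whose every element equals c and that is nonempty is [c]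
theorem nodup_const_eq_single {l : List Int} {c : Int} (hn : l.Nodup)
    (hne : l ≠ []) (hall : ∀ x ∈ l, x = c) : l = [c] := by
  cases l with
  | nil => exact absurd rfl hne
  | cons a t =>
    have ha : a = c := hall a (List.mem_cons_self ..)
    cases t with
    | nil => simp [ha]
    | cons b t' =>
      have hb : b = c := hall b (by simp)
      simp [ha, hb] at hn

theorem ofList_len_one_iff (l : List Int) (hne : l ≠ []) :
    (PySem.Set.ofList l).length = 1 ↔ ∃ c, ∀ x ∈ l, x = c := by
  constructor
  · intro h
    obtain ⟨c, hc⟩ := List.length_eq_one_iff.mp h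
    exact ⟨c, fun x hx => by
      have := (PySem.Set.mem_ofList l x).mpr hx
      rw [hc] at this; simpa using this⟩
  · rintro ⟨c, hc⟩
    have hall : ∀ x ∈ PySem.Set.ofList l, x = c := fun x hx =>
      hc x ((PySem.Set.mem_ofList l x).mp hx)
    have hnel : PySem.Set.ofList l ≠ [] := by
      obtain ⟨a, ha⟩ := List.exists_mem_of_ne_nil l hne
      intro h0
      have := (PySem.Set.mem_ofList l a).mpr ha
      simp [h0] at this
    rw [nodup_const_eq_single (PySem.Set.nodup_ofList l) hnel hall]
    rfl

theorem pySign_eq_one (x : Int) : (pySign x = 1) ↔ x > 0 := by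
  unfold pySign; split_ifs <;> omega

theorem pySign_eq_negone (x : Int) : (pySign x = -1) ↔ x < 0 := by
  unfold pySign; split_ifs <;> omega

theorem pySign_eq_zero (x : Int) : (pySign x = 0) ↔ x = 0 := by
  unfold pySign; split_ifs <;> omega

-- ===== VERDICT (by name: the statement is the Claim_ definition above) =====
theorem long_and_all_same_sign_spec : Claim_equal_long_and_all_same_sign := by
  intro xs _
  unfold Spec_long_and_all_same_sign long_and_all_same_sign long_and_all_same_sign_alt
  by_cases hlen : xs.length ≤ 10
  · simp [hlen]
  · simp only [hlen, if_false]
    rw [fold_eq_ofList_map]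
    have hne : xs.map pySign ≠ [] := by
      simp only [ne_eq, List.map_eq_nil_iff]
      intro h; rw [h] at hlen; simp at hlen
    have hiff := ofList_len_one_iff (xs.map pySign) hne
    rcases hx : xs with _ | ⟨a, t⟩
    · rw [hx] at hlen; simp at hlen
    rcases hx ▸ hiff with ⟨h1, h2⟩
    by_cases hone : ∃ c, ∀ x ∈ (a :: t).map pySign, x = c
    · -- all signs equal; c must be pySign a ∈ {-1,0,1}
      obtain ⟨c, hc⟩ := hone
      have hca : c = pySign a := (hc (pySign a) (by simp)).symm
      subst hca
      have hres : ((a :: t).map pySign |> PySem.Set.ofList).length = 1 :=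
        h2 ⟨pySign a, hc⟩
      rw [hres]
      have hall : ∀ x ∈ a :: t, pySign x = pySign a := fun x hx =>
        hc (pySign x) (List.mem_map_of_mem hx)
      rcases lt_trichotomy a 0 with hneg | hz | hpos
      · have : (a :: t).all (fun x => decide (x > 0)) = false := by
          simp only [List.all_eq_false]
          exact ⟨a, by simp, by simp; omega⟩
        rw [this]
        have : (a :: t).all (fun x => decide (x < 0)) = true := by
          simp only [List.all_eq_true]
          intro x hx
          have := hall x hx
          rw [(pySign_eq_negone a).mpr hneg] at this
          simpa using (pySign_eq_negone x).mp this
        simp [this]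
      · have h0 : ∀ x ∈ a :: t, x = 0 := by
          intro x hx
          exact (pySign_eq_zero x).mp (by rw [hall x hx, hz]; decide)
        have h1' : (a :: t).all (fun x => decide (x > 0)) = false := by
          simp only [List.all_eq_false]
          exact ⟨a, by simp, by simp [h0 a (by simp)]⟩
        have h2' : (a :: t).all (fun x => decide (x < 0)) = false := by
          simp only [List.all_eq_false]
          exact ⟨a, by simp, by simp [h0 a (by simp)]⟩
        have h3' : (a :: t).all (fun x => decide (x = 0)) = true := by
          simp only [List.all_eq_true]; intro x hx; simpa using h0 x hx
        simp [h1', h2', h3']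
      · have : (a :: t).all (fun x => decide (x > 0)) = true := by
          simp only [List.all_eq_true]
          intro x hx
          have := hall x hx
          rw [(pySign_eq_one a).mpr hpos] at this
          simpa using (pySign_eq_one x).mp this
        simp [this]
    · -- signs differ: all three alls are false, and set length ≠ 1
      have hres : ¬ ((a :: t).map pySign |> PySem.Set.ofList).length = 1 := fun h => hone (h1 h)
      push Not at hone
      obtain ⟨x, hx, hxne⟩ := hone (pySign a)
      obtain ⟨y, hy, rfl⟩ := List.mem_map.mp hx
      have hp : (a :: t).all (fun x => decide (x > 0)) = false := by
        simp only [List.all_eq_false]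
        by_cases ha : a > 0
        · exact ⟨y, hy, by intro h; exact hxne (by rw [(pySign_eq_one y).mpr (of_decide_eq_true h), (pySign_eq_one a).mpr ha])⟩
        · exact ⟨a, by simp, by simpa using ha⟩
      have hn : (a :: t).all (fun x => decide (x < 0)) = false := by
        simp only [List.all_eq_false]
        by_cases ha : a < 0
        · exact ⟨y, hy, by intro h; exact hxne (by rw [(pySign_eq_negone y).mpr (of_decide_eq_true h), (pySign_eq_negone a).mpr ha])⟩
        · exact ⟨a, by simp, by simpa using ha⟩
      have hz : (a :: t).all (fun x => decide (x = 0)) = false := by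
        simp only [List.all_eq_false]
        by_cases ha : a = 0
        · exact ⟨y, hy, by intro h; exact hxne (by rw [(pySign_eq_zero y).mpr (of_decide_eq_true h), (pySign_eq_zero a).mpr ha])⟩
        · exact ⟨a, by simp, by simpa using ha⟩
      simp [hp, hn, hz]
      simpa using hres
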